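-- pv_equiv track=rewrite | github.com/andressa-vs/named-entity-recognition-pt | pre_processing.py | insert_X_features
-- ===== SOURCE A (Python) =====
-- from collections import namedtuple, defaultdict
--
-- def insert_X_features(extra_features, all_prediction_mask):
--     all_extra_features = defaultdict(list)
--     for feature, values in extra_features.items():
--         i = 0
--         for prediction in all_prediction_mask:
--             if prediction == True:
--                 all_extra_features[feature].append(values[i])
--                 i += 1
--             else:
--                 all_extra_features[feature].append('X')
--     return all_extra_features
-- ===== SOURCE B (Python) =====
-- from collections import defaultdict
--
-- def insert_X_features(extra_features, all_prediction_mask):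
--     # Scatter algorithm: collect the positions of the True mask entries once,
--     # then for each feature start from an all-'X' template of the mask's length
--     # and scatter the feature's values into those positions by assignment.
--     true_positions = [j for j, m in enumerate(all_prediction_mask) if m == True]
--     all_extra_features = defaultdict(list)
--     for feature, values in extra_features.items():
--         row = ['X'] * len(all_prediction_mask)
--         for j, v in zip(true_positions, values):
--             row[j] = v
--         all_extra_features[feature] = row
--     return all_extra_features
-- ===== Notes on version B (the rewrite author's own statement) =====
-- stated objective: alternative
-- what changed: B replaces A's per-feature walk of the whole mask with a running counter by a scatter: it collects the True positions once, and builds each feature's row by filling an all-'X' template of the mask's length with positional assignments row[j]=v over zip(true_positions, values), so the inner loop runs over the values, not the mask.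
-- intended difference: When all_prediction_mask is empty and extra_features is nonempty, A returns an empty dict (keys are silently dropped because entries are only created by append inside the mask loop), while B returns each feature mapped to an empty row, the intended row of length 0. — e.g. on insert_X_features([("a", ["y"])], []): A returns [], B returns [("a", [])]
import Mathlib
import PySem

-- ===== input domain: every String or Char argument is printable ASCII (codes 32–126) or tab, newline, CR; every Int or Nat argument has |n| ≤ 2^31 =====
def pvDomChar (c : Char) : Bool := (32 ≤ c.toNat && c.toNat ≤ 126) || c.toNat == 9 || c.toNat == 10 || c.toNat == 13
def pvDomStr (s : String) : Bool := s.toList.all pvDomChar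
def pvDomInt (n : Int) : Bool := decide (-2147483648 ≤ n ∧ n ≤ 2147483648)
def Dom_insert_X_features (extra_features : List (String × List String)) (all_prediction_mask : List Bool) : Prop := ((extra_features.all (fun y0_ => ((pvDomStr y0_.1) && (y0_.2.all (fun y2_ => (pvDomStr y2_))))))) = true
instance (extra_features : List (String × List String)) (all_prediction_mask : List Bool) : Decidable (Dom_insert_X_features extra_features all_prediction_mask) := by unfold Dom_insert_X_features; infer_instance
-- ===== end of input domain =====

-- B scatters each feature's values into an all-'X' template at the True positions
-- (collected once), instead of A's per-feature mask walk with a running counter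
-- (objective: alternative algorithm, same cost).

-- ===== PORT A =====
-- inner loop of A: for prediction in all_prediction_mask, appending into the
-- defaultdict entry for `f` (entry created on first append, as in Python).
-- values[i] is ported as getD i "X": Pre_ guarantees i is always in range.
def loopA (f : String) (vs : List String) : List Bool → Nat → PySem.Dict String (List String) → PySem.Dict String (List String)
  | [], _, d => d
  | p :: rest, i, d =>
    if p then loopA f vs rest (i + 1) (d.modify f [] (· ++ [vs.getD i "X"]))
    else loopA f vs rest i (d.modify f [] (· ++ ["X"]))

def insert_X_features (extra_features : List (String × List String)) (all_prediction_mask : List Bool) : List (String × List String) :=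
  (extra_features.foldl (fun d fv => loopA fv.1 fv.2 all_prediction_mask 0 d) PySem.Dict.empty).items

-- ===== PORT B =====
-- true_positions = [j for j, m in enumerate(all_prediction_mask) if m == True]
def truePos (all_prediction_mask : List Bool) : List Int :=
  ((PySem.List.enumerate all_prediction_mask).filter (fun jm => jm.2 == true)).map (·.1)

-- row = ['X'] * len(mask);  for j, v in zip(true_positions, values): row[j] = v
def scatterRow (true_positions : List Int) (values : List String) (n : Int) : List String :=
  (true_positions.zip values).foldl (fun r jv => PySem.List.pySetD r jv.1 jv.2) (PySem.List.pyRepeat ["X"] n)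

def insert_X_features_alt (extra_features : List (String × List String)) (all_prediction_mask : List Bool) : List (String × List String) :=
  (extra_features.foldl (fun d fv => d.insert fv.1 (scatterRow (truePos all_prediction_mask) fv.2 (all_prediction_mask.length : Int))) PySem.Dict.empty).items

-- ===== PRECONDITION & SPEC =====
-- Pre_ excludes association lists with a repeated feature name (a Python dict cannot
-- represent them) and features whose value list is shorter than the number of True
-- entries in the mask (there A raises IndexError; B would return the row with
-- the remaining positions left as 'X').
def Pre_insert_X_features (extra_features : List (String × List String)) (all_prediction_mask : List Bool) : Prop :=
  (extra_features.map Prod.fst).Nodup ∧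
  ∀ fv ∈ extra_features, all_prediction_mask.count true ≤ fv.2.length
instance (extra_features : List (String × List String)) (all_prediction_mask : List Bool) : Decidable (Pre_insert_X_features extra_features all_prediction_mask) := by unfold Pre_insert_X_features; infer_instance

def pvWitness_insert_X_features : (List (String × List String)) × List Bool :=
  ([("pos", ["NN", "VB"]), ("cap", ["no", "yes"])], [true, false, true])

-- When all_prediction_mask is empty and extra_features is nonempty, A returns an
-- empty dict (keys silently dropped, since entries are only created by append inside
-- the mask loop), while B returns each feature mapped to the intended empty row.
def D_insert_X_features (extra_features : List (String × List String)) (all_prediction_mask : List Bool) : Prop :=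
  all_prediction_mask = [] ∧ extra_features ≠ []
instance (extra_features : List (String × List String)) (all_prediction_mask : List Bool) : Decidable (D_insert_X_features extra_features all_prediction_mask) := by unfold D_insert_X_features; infer_instance

def Spec_insert_X_features (extra_features : List (String × List String)) (all_prediction_mask : List Bool) (out : List (String × List String)) : Prop := ¬ D_insert_X_features extra_features all_prediction_mask → out = insert_X_features_alt extra_features all_prediction_mask
instance (extra_features : List (String × List String)) (all_prediction_mask : List Bool) (out : List (String × List String)) : Decidable (Spec_insert_X_features extra_features all_prediction_mask out) := by unfold Spec_insert_X_features; infer_instance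

def pvDiffWitness_insert_X_features : (List (String × List String)) × List Bool :=
  ([("a", ["y"])], [])
def pvDiffWitnessOut_insert_X_features : (List (String × List String)) × (List (String × List String)) :=
  ([], [("a", [])])

-- ===== CLAIM (what is proved, stated in full; the proofs are below) =====
def Claim_unchanged_insert_X_features : Prop := ∀ (extra_features : List (String × List String)) (all_prediction_mask : List Bool), Dom_insert_X_features extra_features all_prediction_mask → Pre_insert_X_features extra_features all_prediction_mask → Spec_insert_X_features extra_features all_prediction_mask (insert_X_features extra_features all_prediction_mask)
def Claim_changed_insert_X_features : Prop := Dom_insert_X_features (pvDiffWitness_insert_X_features.1) (pvDiffWitness_insert_X_features.2) ∧ Pre_insert_X_features (pvDiffWitness_insert_X_features.1) (pvDiffWitness_insert_X_features.2) ∧ D_insert_X_features (pvDiffWitness_insert_X_features.1) (pvDiffWitness_insert_X_features.2) ∧ insert_X_features (pvDiffWitness_insert_X_features.1) (pvDiffWitness_insert_X_features.2) = pvDiffWitnessOut_insert_X_features.1 ∧ insert_X_features_alt (pvDiffWitness_insert_X_features.1) (pvDiffWitness_insert_X_features.2) = pvDiffWitnessOut_insert_X_features.2 ∧ pvDiffWitnessOut_insert_X_features.1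 ≠ pvDiffWitnessOut_insert_X_features.2
def Claim_exact_insert_X_features : Prop := ∀ (extra_features : List (String × List String)) (all_prediction_mask : List Bool), Dom_insert_X_features extra_features all_prediction_mask → Pre_insert_X_features extra_features all_prediction_mask → D_insert_X_features extra_features all_prediction_mask → insert_X_features extra_features all_prediction_mask ≠ insert_X_features_alt extra_features all_prediction_mask
-- ===== LEMMAS AND PROOFS =====

-- the row A's inner loop appends for one feature (running index i into vs)
def rowA (vs : List String) : List Bool → Nat → List String
  | [], _ => []
  | p :: rest, i => (if p then vs.getD i "X" else "X") :: rowA vs rest (if p then i + 1 else i)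

-- reference row: consume vs from the front at True positions
def specR : List Bool → List String → List String
  | [], _ => []
  | p :: rest, vs => (if p then vs.headD "X" else "X") :: specR rest (if p then vs.tail else vs)

lemma rowA_eq_specR (vs : List String) :
    ∀ (mask : List Bool) (i : Nat), rowA vs mask i = specR mask (vs.drop i) := by
  intro mask
  induction mask with
  | nil => intro i; rfl
  | cons p rest ih =>
      intro i
      by_cases hp : p = true <;>
        simp [rowA, specR, hp, ih, List.getD_eq_getElem?_getD, List.headD_eq_head?_getD, List.head?_drop, List.tail_drop]

lemma insert_insert_same {κ ν : Type} [BEq κ] [LawfulBEq κ] (d : PySem.Dict κ ν) (k : κ) (v w : ν) :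
    (d.insert k v).insert k w = d.insert k w := by
  have h1 : (d.insert k v).contains k = true := PySem.Dict.contains_insert_self d k v
  apply PySem.Dict.ext
  by_cases hc : d.contains k = true
  · simp only [PySem.Dict.insert, hc, if_true] at h1 ⊢
    rw [if_pos h1, List.map_map]
    show List.map _ d.items = List.map _ d.items
    congr 1
    funext p
    by_cases hp : (p.1 == k) = true <;> simp [Function.comp, hp]
  · have hall : ∀ p ∈ d.items, (p.1 == k) = false := by
      intro p hp
      by_contra h
      exact hc (List.any_eq_true.2 ⟨p, hp, by simpa using h⟩)
    simp only [Bool.not_eq_true] at hc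
    simp only [PySem.Dict.insert, hc, Bool.false_eq_true, if_false] at h1 ⊢
    rw [if_pos h1]
    show List.map _ _ = _
    rw [List.map_append]
    congr 1
    · apply (List.map_congr_left ?_).trans (List.map_id _)
      intro p hp; simp [hall p hp]
    · simp

-- A's inner loop for one feature is one insert of the accumulated row
lemma loopA_eq_insert (f : String) (vs : List String) :
    ∀ (rest : List Bool) (p : Bool) (i : Nat) (d : PySem.Dict String (List String)),
      loopA f vs (p :: rest) i d = d.insert f (d.getD f [] ++ rowA vs (p :: rest) i) := by
  intro rest
  induction rest with
  | nil =>
      intro p i d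
      by_cases hp : p = true <;> simp [loopA, rowA, hp, PySem.Dict.modify]
  | cons q rs ih =>
      intro p i d
      by_cases hp : p = true
      · rw [loopA, if_pos hp, ih]
        simp only [PySem.Dict.modify]
        rw [PySem.Dict.getD_insert_self, insert_insert_same, List.append_assoc]
        simp [rowA, hp]
      · rw [loopA, if_neg hp, ih]
        simp only [PySem.Dict.modify]
        rw [PySem.Dict.getD_insert_self, insert_insert_same, List.append_assoc]
        simp [rowA, hp]

-- truePos with a general start offset
def tpsAux (mask : List Bool) (s : Int) : List Int :=
  ((PySem.List.enumerate mask s).filter (fun jm => jm.2 == true)).map (·.1)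

lemma truePos_eq_tpsAux (mask : List Bool) : truePos mask = tpsAux mask 0 := rfl

lemma tpsAux_cons (p : Bool) (mask : List Bool) (s : Int) :
    tpsAux (p :: mask) s = if p then s :: tpsAux mask (s + 1) else tpsAux mask (s + 1) := by
  by_cases hp : p = true <;> simp [tpsAux, PySem.List.enumerate_cons, hp]

lemma tpsAux_shift (mask : List Bool) : ∀ s : Int, tpsAux mask (s + 1) = (tpsAux mask s).map (· + 1) := by
  induction mask with
  | nil => intro s; rfl
  | cons p rest ih =>
      intro s
      by_cases hp : p = true <;> simp [tpsAux_cons, hp, ih]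

lemma tpsAux_nonneg (mask : List Bool) : ∀ (s j : Int), j ∈ tpsAux mask s → s ≤ j := by
  induction mask with
  | nil => intro s j h; simp [tpsAux] at h
  | cons p rest ih =>
      intro s j h
      rw [tpsAux_cons] at h
      by_cases hp : p = true <;> simp [hp] at h
      · rcases h with rfl | h
        · omega
        · have := ih (s + 1) j h; omega
      · have := ih (s + 1) j h; omega

lemma pySetD_cons_pos (a : String) (t : List String) (j : Int) (v : String) (hj : 1 ≤ j) :
    PySem.List.pySetD (a :: t) j v = a :: PySem.List.pySetD t (j - 1) v := by
  obtain ⟨n, rfl⟩ : ∃ n : Nat, j = (n : Int) + 1 := ⟨(j - 1).toNat, by omega⟩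
  rw [PySem.List.pySetD_of_nonneg _ _ (by omega), PySem.List.pySetD_of_nonneg _ _ (by omega)]
  have h1 : ((n : Int) + 1).toNat = n + 1 := by omega
  simp [h1]

-- scatter into a cons shifts by one when every position is ≥ 1
lemma scatter_cons (pairs : List (Int × String)) :
    ∀ (a : String) (t : List String), (∀ jv ∈ pairs, 1 ≤ jv.1) →
      pairs.foldl (fun r jv => PySem.List.pySetD r jv.1 jv.2) (a :: t)
        = a :: (pairs.map (fun jv => (jv.1 - 1, jv.2))).foldl (fun r jv => PySem.List.pySetD r jv.1 jv.2) t := by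
  induction pairs with
  | nil => intro a t _; rfl
  | cons jv rest ih =>
      intro a t h
      simp only [List.foldl_cons, List.map_cons]
      rw [pySetD_cons_pos a t jv.1 jv.2 (h jv (List.mem_cons_self))]
      exact ih a _ (fun x hx => h x (List.mem_cons_of_mem _ hx))

lemma specR_nil : ∀ (mask : List Bool), specR mask [] = List.replicate mask.length "X" := by
  intro mask
  induction mask with
  | nil => rfl
  | cons p rest ih => by_cases hp : p = true <;> simp [specR, hp, ih, List.replicate_succ]

lemma scatter_eq_specR : ∀ (mask : List Bool) (vs : List String),
    ((tpsAux mask 0).zip vs).foldl (fun r jv => PySem.List.pySetD r jv.1 jv.2)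
        (List.replicate mask.length "X") = specR mask vs := by
  intro mask
  induction mask with
  | nil => intro vs; simp [tpsAux, specR]
  | cons p rest ih =>
      intro vs
      rcases vs with _ | ⟨v, vs'⟩
      · simp [specR_nil]
      · have hshift : tpsAux rest 1 = (tpsAux rest 0).map (· + 1) := by
          have h := tpsAux_shift rest 0
          norm_num at h
          exact h
        rw [tpsAux_cons]
        by_cases hp : p = true
        · simp only [hp, if_true, zero_add, List.length_cons, List.replicate_succ,
            List.zip_cons_cons, List.foldl_cons]
          have h0 : PySem.List.pySetD ("X" :: List.replicate rest.length "X") (0 : Int) v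
              = v :: List.replicate rest.length "X" := by
            rw [PySem.List.pySetD_of_nonneg _ _ (by omega)]; simp
          rw [h0, hshift, List.zip_map_left, scatter_cons]
          · rw [List.map_map]
            have hmm : ((tpsAux rest 0).zip vs').map
                ((fun jv : Int × String => (jv.1 - 1, jv.2)) ∘ Prod.map (· + 1) id)
                = (tpsAux rest 0).zip vs' := by
              have : ((fun jv : Int × String => (jv.1 - 1, jv.2)) ∘ Prod.map (· + 1) id)
                  = fun jv => jv := by
                funext jv; cases jv; simp [Prod.map]
              rw [this, List.map_id']
            rw [hmm, ih]
            simp [specR]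
          · intro jv hjv
            rcases List.mem_map.1 hjv with ⟨x, hx, rfl⟩
            have hx1 : x.1 ∈ tpsAux rest 0 := (List.of_mem_zip hx).1
            have := tpsAux_nonneg rest 0 x.1 hx1
            simp [Prod.map]; omega
        · simp only [hp, Bool.false_eq_true, if_false, zero_add, List.length_cons, List.replicate_succ]
          rw [hshift, List.zip_map_left, scatter_cons]
          · rw [List.map_map]
            have hmm : ((tpsAux rest 0).zip (v :: vs')).map
                ((fun jv : Int × String => (jv.1 - 1, jv.2)) ∘ Prod.map (· + 1) id)
                = (tpsAux rest 0).zip (v :: vs') := by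
              have : ((fun jv : Int × String => (jv.1 - 1, jv.2)) ∘ Prod.map (· + 1) id)
                  = fun jv => jv := by
                funext jv; cases jv; simp [Prod.map]
              rw [this, List.map_id']
            rw [hmm, ih]
            simp [specR]
          · intro jv hjv
            rcases List.mem_map.1 hjv with ⟨x, hx, rfl⟩
            have hx1 : x.1 ∈ tpsAux rest 0 := (List.of_mem_zip hx).1
            have := tpsAux_nonneg rest 0 x.1 hx1
            simp [Prod.map]; omega

lemma scatterRow_eq_rowA (mask : List Bool) (vs : List String) :
    scatterRow (truePos mask) vs (mask.length : Int) = rowA vs mask 0 := by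
  rw [scatterRow, truePos_eq_tpsAux, rowA_eq_specR, List.drop_zero]
  have hrep : PySem.List.pyRepeat ["X"] (mask.length : Int) = List.replicate mask.length "X" := by
    rw [PySem.List.pyRepeat_singleton]; simp
  rw [hrep, scatter_eq_specR]

-- outer fold: with fresh distinct keys, A's modify-loop equals B's insert-loop
lemma outer_eq (p : Bool) (rest : List Bool) :
    ∀ (ef : List (String × List String)) (d : PySem.Dict String (List String)),
      (∀ fv ∈ ef, d.contains fv.1 = false) → (ef.map Prod.fst).Nodup →
      ef.foldl (fun d fv => loopA fv.1 fv.2 (p :: rest) 0 d) d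
        = ef.foldl (fun d fv => d.insert fv.1 (scatterRow (truePos (p :: rest)) fv.2 ((p :: rest).length : Int))) d := by
  intro ef
  induction ef with
  | nil => intro d _ _; rfl
  | cons fv tl ih =>
      intro d hfresh hnodup
      simp only [List.foldl_cons]
      rw [loopA_eq_insert, PySem.Dict.getD_of_not_contains _ _ (hfresh fv (List.mem_cons_self)),
        List.nil_append, ← scatterRow_eq_rowA]
      apply ih
      · intro gv hgv
        rw [PySem.Dict.contains_insert]
        have hne : gv.1 ≠ fv.1 := by
          simp only [List.map_cons, List.nodup_cons] at hnodup
          intro h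
          exact hnodup.1 (h ▸ List.mem_map_of_mem hgv)
        simp [hne, hfresh gv (List.mem_cons_of_mem _ hgv)]
      · simp only [List.map_cons, List.nodup_cons] at hnodup
        exact hnodup.2

lemma foldl_loopA_nil (ef : List (String × List String)) :
    ∀ d : PySem.Dict String (List String),
      ef.foldl (fun d fv => loopA fv.1 fv.2 [] 0 d) d = d := by
  intro d; simp [loopA]

-- ===== VERDICT =====
theorem insert_X_features_spec : Claim_unchanged_insert_X_features := by
  intro ef mask _ hpre hnd
  rcases mask with _ | ⟨p, rest⟩
  · have hef : ef = [] := by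
      by_contra h
      exact hnd ⟨rfl, h⟩
    subst hef; rfl
  · unfold insert_X_features insert_X_features_alt
    rw [outer_eq p rest ef PySem.Dict.empty
      (fun fv _ => PySem.Dict.contains_empty fv.1) hpre.1]

theorem insert_X_features_changed : Claim_changed_insert_X_features := by
  unfold Claim_changed_insert_X_features; decide

theorem insert_X_features_tight : Claim_exact_insert_X_features := by
  intro ef mask _ hpre hd
  rcases hd with ⟨rfl, hef⟩
  unfold insert_X_features insert_X_features_alt
  rw [foldl_loopA_nil]
  rw [PySem.Dict.items_foldl_insert_fresh ef Prod.fst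
    (fun fv => scatterRow (truePos []) fv.2 (([] : List Bool).length : Int)) PySem.Dict.empty
    (fun a _ => PySem.Dict.contains_empty a.1) hpre.1]
  cases ef with
  | nil => exact absurd rfl hef
  | cons fv tl => simp [PySem.Dict.empty]
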